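-- pv_equiv track=rewrite | github.com/pomagrenate/po-health | services/search_engine.py | _simplify_medical_text
-- ===== SOURCE A (Python) =====
-- def _simplify_medical_text(text: str) -> str:
--     """Simple rule-based simplification for 'patient-friendly' mode."""
--     # This is a placeholder for real simplification logic or LLM call
--     replacements = {
--         "indications and usage": "What it's for",
--         "contraindications": "Who should not use it",
--         "adverse reactions": "Side effects",
--         "hypertension": "High blood pressure",
--         "analgesic": "Pain reliever",
--         "antipyretic": "Fever reducer",
--     }
--     for old, new in replacements.items():
--         text = text.replace(old, new).replace(old.capitalize(), new.capitalize())
--     return text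
-- ===== SOURCE B (Python) =====
-- def _simplify_medical_text(text: str) -> str:
--     """Simple rule-based simplification for 'patient-friendly' mode."""
--     replacements = {
--         "indications and usage": "What it's for",
--         "contraindications": "Who should not use it",
--         "adverse reactions": "Side effects",
--         "hypertension": "High blood pressure",
--         "analgesic": "Pain reliever",
--         "antipyretic": "Fever reducer",
--     }
--     for old, new in replacements.items():
--         # one left-to-right scan replacing BOTH case variants of this rule
--         variants = ((old, new), (old.capitalize(), new.capitalize()))
--         out = []
--         i = 0
--         n = len(text)
--         while i < n:
--             for pat, rep in variants:
--                 if text.startswith(pat, i):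
--                     out.append(rep)
--                     i += len(pat)
--                     break
--             else:
--                 out.append(text[i])
--                 i += 1
--         text = "".join(out)
--     return text
-- ===== Notes on version B (the rewrite author's own statement) =====
-- stated objective: alternative
-- what changed: For each rule B replaces both the lower-case and the Capitalized variant in a single left-to-right scan (6 passes over the text), instead of A's two sequential str.replace passes per rule (12 passes).
import Mathlib
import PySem

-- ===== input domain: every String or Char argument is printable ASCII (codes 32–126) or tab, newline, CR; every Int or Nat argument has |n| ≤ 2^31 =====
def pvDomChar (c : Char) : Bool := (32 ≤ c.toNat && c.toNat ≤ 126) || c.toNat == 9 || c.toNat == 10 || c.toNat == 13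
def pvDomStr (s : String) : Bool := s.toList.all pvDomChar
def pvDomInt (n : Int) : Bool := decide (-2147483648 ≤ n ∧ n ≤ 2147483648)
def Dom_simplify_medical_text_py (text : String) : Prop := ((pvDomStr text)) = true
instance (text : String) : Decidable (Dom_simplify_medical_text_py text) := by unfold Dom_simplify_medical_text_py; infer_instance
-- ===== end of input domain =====

-- B replaces each rule's two case variants in ONE left-to-right scan (6 passes over the text)
-- instead of A's two sequential str.replace passes per rule (12 passes); objective: alternative.

-- ===== PORT A =====
-- the literal replacement table both Pythons carry
def pvRules : List (String × String) :=
  [("indications and usage", "What it's for"),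
   ("contraindications", "Who should not use it"),
   ("adverse reactions", "Side effects"),
   ("hypertension", "High blood pressure"),
   ("analgesic", "Pain reliever"),
   ("antipyretic", "Fever reducer")]

-- hand port of Python str.capitalize (first char uppercased, rest lowercased); exact on ASCII
def pvCapitalizeL (s : List Char) : List Char :=
  match s with
  | [] => []
  | c :: t => PySem.Chars.upperChar c :: PySem.Chars.lower t

def pvCapitalize (s : String) : String := String.ofList (pvCapitalizeL s.toList)

def simplify_medical_text_py (text : String) : String :=
  pvRules.foldl
    (fun t p =>
      PySem.Str.replace (PySem.Str.replace t p.1 p.2) (pvCapitalize p.1) (pvCapitalize p.2))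
    text

-- ===== PORT B =====
-- one scan over the text: at each position try pattern o (→ n), then pattern O (→ N), else copy the char
def pvScan2 (o n O N : List Char) : List Char → List Char
  | [] => []
  | c :: rest =>
    if o.isPrefixOf (c :: rest) then n ++ pvScan2 o n O N (rest.drop (o.length - 1))
    else if O.isPrefixOf (c :: rest) then N ++ pvScan2 o n O N (rest.drop (O.length - 1))
    else c :: pvScan2 o n O N rest
termination_by t => t.length
decreasing_by all_goals simp [List.length_drop]

def simplify_medical_text_py_alt (text : String) : String :=
  pvRules.foldl
    (fun t p =>
      String.ofList (pvScan2 p.1.toList p.2.toList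
        (pvCapitalizeL p.1.toList) (pvCapitalizeL p.2.toList) t.toList))
    text

-- ===== PRECONDITION & SPEC =====
def Spec_simplify_medical_text_py (text : String) (out : String) : Prop := out = simplify_medical_text_py_alt text
instance (text : String) (out : String) : Decidable (Spec_simplify_medical_text_py text out) := by unfold Spec_simplify_medical_text_py; infer_instance

-- ===== CLAIM (what is proved, stated in full; the proofs are below) =====
def Claim_equal_simplify_medical_text_py : Prop := ∀ (text : String), Dom_simplify_medical_text_py text → Spec_simplify_medical_text_py text (simplify_medical_text_py text)

-- ===== LEMMAS AND PROOFS =====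

-- clean recursive form of Python str.replace (nonempty pattern): leftmost non-overlapping scan
def pvRep (o n : List Char) : List Char → List Char
  | [] => []
  | c :: rest =>
    if o.isPrefixOf (c :: rest) then n ++ pvRep o n (rest.drop (o.length - 1))
    else c :: pvRep o n rest
termination_by t => t.length
decreasing_by all_goals simp [List.length_drop]

theorem pvGo_zero (o n : List Char) (l acc : List Char) :
    PySem.Chars.replace.go o n 0 l acc = acc.reverse ++ l := by
  rw [PySem.Chars.replace.go]

theorem pvGo_nil (o n : List Char) (fuel : Nat) (acc : List Char) :
    PySem.Chars.replace.go o n (fuel + 1) [] acc = acc.reverse := by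
  rw [PySem.Chars.replace.go]
  omega

theorem pvGo_cons (o n : List Char) (fuel : Nat) (c : Char) (t acc : List Char) :
    PySem.Chars.replace.go o n (fuel + 1) (c :: t) acc =
      if o.isPrefixOf (c :: t) then
        PySem.Chars.replace.go o n fuel (List.drop o.length (c :: t)) (n.reverse ++ acc)
      else PySem.Chars.replace.go o n fuel t (c :: acc) := by
  rw [PySem.Chars.replace.go]

theorem pvRep_go (o n : List Char) (ho : o ≠ []) :
    ∀ (fuel : Nat) (l acc : List Char), l.length ≤ fuel →
      PySem.Chars.replace.go o n fuel l acc = acc.reverse ++ pvRep o n l := by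
  intro fuel
  induction fuel with
  | zero =>
    intro l acc h
    have : l = [] := List.eq_nil_of_length_eq_zero (Nat.le_zero.mp h)
    subst this
    rw [pvGo_zero]; simp [pvRep]
  | succ fuel ih =>
    intro l acc h
    match l with
    | [] => rw [pvGo_nil]; simp [pvRep]
    | c :: t =>
      have holen : 1 ≤ o.length := List.length_pos_of_ne_nil ho
      have hlt : t.length ≤ fuel := by simp at h; omega
      rw [pvGo_cons]
      by_cases hp : o.isPrefixOf (c :: t)
      · simp only [hp, if_true]
        have hdrop : List.drop o.length (c :: t) = t.drop (o.length - 1) := by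
          cases o with
          | nil => exact absurd rfl ho
          | cons _ _ => simp
        rw [hdrop, ih _ _ (by rw [List.length_drop]; omega)]
        rw [pvRep]; simp [hp]
      · simp only [hp]
        rw [ih _ _ hlt]
        rw [pvRep]; simp [hp]

theorem pvReplace_eq_pvRep (s o n : List Char) (ho : o ≠ []) :
    PySem.Chars.replace s o n = pvRep o n s := by
  unfold PySem.Chars.replace
  have : o.isEmpty = false := by cases o with | nil => exact absurd rfl ho | cons _ _ => rfl
  rw [this]
  simpa using pvRep_go o n ho s.length s [] (le_refl _)

-- a prefix of b ++ c is a prefix of b, or extends past b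
theorem pvPrefixAppendCases {a b c : List Char} (h : a <+: b ++ c) : a <+: b ∨ b <+: a :=
  List.prefix_or_prefix_of_prefix h (List.prefix_append b c)

-- the scan copies a block x unchanged if no o-match can start inside x
theorem pvPassThrough (o n : List Char) :
    ∀ (x u : List Char), (∀ j, j < x.length → ¬ o <+: (x.drop j ++ u)) →
      pvRep o n (x ++ u) = x ++ pvRep o n u := by
  intro x
  induction x with
  | nil => intro u _; simp
  | cons c m ih =>
    intro u hx
    have h0 : ¬ o <+: (c :: (m ++ u)) := by simpa using hx 0 (by simp)
    have hp : o.isPrefixOf (c :: (m ++ u)) = false := by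
      rw [Bool.eq_false_iff]
      intro hc
      exact h0 (List.isPrefixOf_iff_prefix.mp hc)
    rw [List.cons_append, pvRep]
    simp only [hp, Bool.false_eq_true, if_false]
    rw [ih u (fun j hj => by simpa using hx (j + 1) (by simpa using Nat.succ_lt_succ hj))]
    simp

-- the scan replaces a match sitting at the head
theorem pvRepHead (O N X : List Char) (hO : O ≠ []) :
    pvRep O N (O ++ X) = N ++ pvRep O N X := by
  cases O with
  | nil => exact absurd rfl hO
  | cons Oh Ot =>
    rw [List.cons_append, pvRep]
    have hpre : (Oh :: Ot).isPrefixOf (Oh :: (Ot ++ X)) = true := by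
      rw [List.isPrefixOf_iff_prefix, List.cons_prefix_cons]
      exact ⟨rfl, List.prefix_append Ot X⟩
    simp only [hpre, if_true]
    have : (Ot ++ X).drop ((Oh :: Ot).length - 1) = X := by
      simp
    rw [this]

-- no suffix of O can become a prefix after o-replacement (the replacement never creates O-material)
theorem pvNoCreate (o n O : List Char)
    (C4 : ∀ k, k < O.length → ¬ (O.drop k <+: n) ∧ ¬ (n <+: O.drop k)) :
    ∀ (m : Nat) (t : List Char), t.length ≤ m → ∀ k, k < O.length →
      ¬ (O.drop k <+: t) → ¬ (O.drop k <+: pvRep o n t) := by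
  intro m
  induction m with
  | zero =>
    intro t ht k hk hno
    have : t = [] := List.eq_nil_of_length_eq_zero (Nat.le_zero.mp ht)
    subst this
    simpa [pvRep] using hno
  | succ m ih =>
    intro t ht k hk hno
    match t with
    | [] => simpa [pvRep] using hno
    | c :: rest =>
      by_cases hp : o.isPrefixOf (c :: rest)
      · rw [pvRep]; simp only [hp, if_true]
        intro hpre
        rcases pvPrefixAppendCases hpre with h | h
        · exact (C4 k hk).1 h
        · exact (C4 k hk).2 h
      · rw [pvRep]; simp only [hp, Bool.false_eq_true, if_false]
        intro hpre
        have hOk : O.drop k = O[k] :: O.drop (k + 1) := List.drop_eq_getElem_cons hk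
        rw [hOk, List.cons_prefix_cons] at hpre
        obtain ⟨hc, htail⟩ := hpre
        by_cases hk1 : k + 1 < O.length
        · have hno' : ¬ (O.drop (k + 1) <+: rest) := fun hr =>
            hno (by rw [hOk, List.cons_prefix_cons]; exact ⟨hc, hr⟩)
          exact ih rest (by simp at ht; omega) (k + 1) hk1 hno' htail
        · have hnil : O.drop (k + 1) = [] := List.drop_eq_nil_iff.mpr (by omega)
          exact hno (by rw [hOk, hnil, List.cons_prefix_cons]; exact ⟨hc, List.nil_prefix⟩)

-- if O did not match at this position, it still does not after the tail is o-replaced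
theorem pvNoNew (o n O : List Char) (hO : O ≠ [])
    (C4 : ∀ k, k < O.length → ¬ (O.drop k <+: n) ∧ ¬ (n <+: O.drop k))
    (c : Char) (rest : List Char) (hnoO : ¬ O <+: (c :: rest)) :
    ¬ O <+: (c :: pvRep o n rest) := by
  cases O with
  | nil => exact absurd rfl hO
  | cons Oh Ot =>
    intro hpre
    rw [List.cons_prefix_cons] at hpre
    obtain ⟨hc, htail⟩ := hpre
    cases Ot with
    | nil => exact hnoO (by rw [List.cons_prefix_cons]; exact ⟨hc, List.nil_prefix⟩)
    | cons Oh2 Ot2 =>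
      have h1 : 1 < (Oh :: Oh2 :: Ot2).length := by simp
      have hnot : ¬ ((Oh :: Oh2 :: Ot2).drop 1 <+: rest) := fun hr =>
        hnoO (by rw [List.cons_prefix_cons]; exact ⟨hc, by simpa using hr⟩)
      exact pvNoCreate o n (Oh :: Oh2 :: Ot2) C4 rest.length rest (le_refl _) 1 h1 hnot
        (by simpa using htail)

-- MAIN: for one rule (patterns o and O with the concrete non-interference conditions),
-- replacing o then O sequentially equals the single dual scan
theorem pvMain (o n O N : List Char) (_ho : o ≠ []) (hO : O ≠ [])
    (C1 : ∀ j, j < O.length → ¬ (o <+: O.drop j) ∧ ¬ (O.drop j <+: o))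
    (C2 : ∀ j, j < n.length → ¬ (O <+: n.drop j) ∧ ¬ (n.drop j <+: O))
    (C4 : ∀ k, k < O.length → ¬ (O.drop k <+: n) ∧ ¬ (n <+: O.drop k)) :
    ∀ (m : Nat) (t : List Char), t.length ≤ m →
      pvRep O N (pvRep o n t) = pvScan2 o n O N t := by
  intro m
  induction m with
  | zero =>
    intro t ht
    have : t = [] := List.eq_nil_of_length_eq_zero (Nat.le_zero.mp ht)
    subst this; simp [pvRep, pvScan2]
  | succ m ih =>
    intro t ht
    match t with
    | [] => simp [pvRep, pvScan2]
    | c :: rest =>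
      have hlen : rest.length ≤ m := by simp at ht; omega
      by_cases hp : o.isPrefixOf (c :: rest)
      · -- o matches here: both sides emit n and continue after the match
        rw [pvRep]; simp only [hp, if_true]
        rw [pvScan2]; simp only [hp, if_true]
        have hpass : pvRep O N (n ++ pvRep o n (rest.drop (o.length - 1)))
            = n ++ pvRep O N (pvRep o n (rest.drop (o.length - 1))) := by
          apply pvPassThrough O N
          intro j hj hpre
          rcases pvPrefixAppendCases hpre with h | h
          · exact (C2 j hj).1 h
          · exact (C2 j hj).2 h
        rw [hpass, ih _ (by rw [List.length_drop]; omega)]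
      · by_cases hPc : O.isPrefixOf (c :: rest)
        · -- O matches here (o does not): the o-pass walks over O untouched, the O-pass replaces it
          rw [pvScan2]; simp only [hp, Bool.false_eq_true, if_false, hPc, if_true]
          have hOpre : O <+: (c :: rest) := List.isPrefixOf_iff_prefix.mp hPc
          obtain ⟨u, hu⟩ := hOpre
          have hinner : pvRep o n (c :: rest) = O ++ pvRep o n u := by
            rw [← hu]
            apply pvPassThrough o n
            intro j hj hpre
            rcases pvPrefixAppendCases hpre with h | h
            · exact (C1 j hj).1 h
            · exact (C1 j hj).2 h
          rw [hinner, pvRepHead O N _ hO]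
          have hulen : u.length ≤ m := by
            have : (c :: rest).length = O.length + u.length := by rw [← hu]; simp
            have hOl : 1 ≤ O.length := List.length_pos_of_ne_nil hO
            simp at ht this ⊢; omega
          rw [ih u hulen]
          have : rest.drop (O.length - 1) = u := by
            have h2 := congrArg (List.drop O.length) hu
            rw [List.drop_left] at h2
            rw [h2]
            cases O with
            | nil => exact absurd rfl hO
            | cons _ _ => simp
          rw [this]
        · -- neither matches here: both sides copy the char; O cannot newly match the replaced tail
          rw [pvRep]; simp only [hp, Bool.false_eq_true, if_false]
          rw [pvScan2]; simp only [hp, Bool.false_eq_true, if_false, hPc, if_false]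
          rw [pvRep]
          have hnoOt : ¬ O <+: (c :: rest) := fun h => hPc (List.isPrefixOf_iff_prefix.mpr h)
          have hnoO : O.isPrefixOf (c :: pvRep o n rest) = false := by
            rw [Bool.eq_false_iff]
            intro hc
            exact pvNoNew o n O hO C4 c rest hnoOt (List.isPrefixOf_iff_prefix.mp hc)
          simp only [hnoO, Bool.false_eq_true, if_false]
          rw [ih rest hlen]

-- String-level one-rule equality, assembled from the scan lemmas and the concrete side conditions
theorem pvRuleEq (o n : String) (ho : o.toList ≠ []) (hO : (pvCapitalizeL o.toList) ≠ [])
    (C1 : ∀ j, j < (pvCapitalizeL o.toList).length →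
        ¬ (o.toList <+: (pvCapitalizeL o.toList).drop j) ∧ ¬ ((pvCapitalizeL o.toList).drop j <+: o.toList))
    (C2 : ∀ j, j < n.toList.length →
        ¬ ((pvCapitalizeL o.toList) <+: n.toList.drop j) ∧ ¬ (n.toList.drop j <+: (pvCapitalizeL o.toList)))
    (C4 : ∀ k, k < (pvCapitalizeL o.toList).length →
        ¬ ((pvCapitalizeL o.toList).drop k <+: n.toList) ∧ ¬ (n.toList <+: (pvCapitalizeL o.toList).drop k))
    (t : String) :
    PySem.Str.replace (PySem.Str.replace t o n) (pvCapitalize o) (pvCapitalize n)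
      = String.ofList (pvScan2 o.toList n.toList (pvCapitalizeL o.toList) (pvCapitalizeL n.toList) t.toList) := by
  apply String.toList_inj.mp
  rw [PySem.Str.toList_replace, PySem.Str.toList_replace]
  unfold pvCapitalize
  simp only [String.toList_ofList]
  rw [pvReplace_eq_pvRep _ _ _ ho, pvReplace_eq_pvRep _ _ _ hO]
  exact pvMain o.toList n.toList (pvCapitalizeL o.toList) (pvCapitalizeL n.toList)
    ho hO C1 C2 C4 t.toList.length t.toList (le_refl _)

-- ===== VERDICT (by name: the statement is the Claim_ definition above) =====
theorem simplify_medical_text_py_spec : Claim_equal_simplify_medical_text_py := by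
  intro text _
  unfold Spec_simplify_medical_text_py
  unfold simplify_medical_text_py simplify_medical_text_py_alt pvRules
  simp only [List.foldl_cons, List.foldl_nil]
  rw [pvRuleEq _ _ (by decide) (by decide) (by decide) (by decide) (by decide)]
  rw [pvRuleEq _ _ (by decide) (by decide) (by decide) (by decide) (by decide)]
  rw [pvRuleEq _ _ (by decide) (by decide) (by decide) (by decide) (by decide)]
  rw [pvRuleEq _ _ (by decide) (by decide) (by decide) (by decide) (by decide)]
  rw [pvRuleEq _ _ (by decide) (by decide) (by decide) (by decide) (by decide)]
  rw [pvRuleEq _ _ (by decide) (by decide) (by decide) (by decide) (by decide)]
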